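-- pv_equiv track=rewrite | github.com/xiaoweiChen/CMake-Cookbook | md2rst.py | formatPara
-- ===== SOURCE A (Python) =====
-- def formatPara(lines:[str], startStr:str, appendStr:str)->[str]:
--     i = 0
--     while i <len(lines):
--         if(lines[i].startswith(startStr)):
--             lines[i] = lines[i].replace(startStr, '')
--             lines.insert(i+1,appendStr)
--         i+=1
--     return lines
-- ===== SOURCE B (Python) =====
-- def formatPara(lines, startStr, appendStr):
--     # Two passes, mutating the same list object (as A does):
--     # pass 1 rewrites matching lines in place and records their indices;
--     # pass 2 inserts appendStr after each recorded index, back to front.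
--     hits = []
--     for i in range(len(lines)):
--         if lines[i].startswith(startStr):
--             lines[i] = lines[i].replace(startStr, '')
--             hits.append(i)
--     for i in reversed(hits):
--         lines.insert(i + 1, appendStr)
--     return lines
-- ===== Notes on version B (the rewrite author's own statement) =====
-- stated objective: alternative
-- what changed: A interleaves rewriting and insertion in one index-walk over a growing list; B does two passes: first rewrite matching lines in place and record their indices, then insert appendStr after each recorded index back to front. Pre_ excludes only inputs on which A never returns (it loops forever when some line starts with startStr and appendStr itself starts with startStr, e.g. startStr == '').
import Mathlib
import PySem

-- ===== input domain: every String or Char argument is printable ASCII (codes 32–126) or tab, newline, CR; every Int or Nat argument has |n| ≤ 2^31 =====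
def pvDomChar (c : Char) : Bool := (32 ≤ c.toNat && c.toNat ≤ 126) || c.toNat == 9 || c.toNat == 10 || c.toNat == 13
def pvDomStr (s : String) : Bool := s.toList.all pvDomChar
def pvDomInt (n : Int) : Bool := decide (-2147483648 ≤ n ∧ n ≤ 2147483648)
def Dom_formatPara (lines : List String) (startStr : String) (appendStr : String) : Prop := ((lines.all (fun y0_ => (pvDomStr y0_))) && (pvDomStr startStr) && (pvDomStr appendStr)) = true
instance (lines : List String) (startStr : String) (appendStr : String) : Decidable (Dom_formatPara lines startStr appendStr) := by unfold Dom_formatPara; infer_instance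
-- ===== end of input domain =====

-- B changes the decomposition (one interleaved index-walk in A vs rewrite-and-record then
-- insert-back-to-front in B); Python A and B both mutate the caller's list in place, the
-- equivalence proved here is about the returned value.

-- ===== PORT A =====
-- A's while-loop over the growing list; fuel makes the same computation total (under
-- Pre_formatPara 2*len+1 steps always suffice; the fuel-out branch returns the current list).
def formatParaGoA (startStr appendStr : String) : Nat → List String → List String
  | 0, ls => ls
  | _ + 1, [] => []
  | f + 1, l :: rest =>
    if PySem.Str.startswith l startStr then
      PySem.Str.replace l startStr "" :: formatParaGoA startStr appendStr f (appendStr :: rest)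
    else
      l :: formatParaGoA startStr appendStr f rest

def formatPara (lines : List String) (startStr : String) (appendStr : String) : List String :=
  formatParaGoA startStr appendStr (2 * lines.length + 1) lines

-- ===== PORT B =====
-- pass 1 of Source B: rewrite matching lines in place, record their (absolute) indices in order
def formatParaPass1 (startStr : String) : Nat → List String → List String × List Nat
  | _, [] => ([], [])
  | i, l :: rest =>
    let r := formatParaPass1 startStr (i + 1) rest
    if PySem.Str.startswith l startStr then
      (PySem.Str.replace l startStr "" :: r.1, i :: r.2)
    else
      (l :: r.1, r.2)

def formatPara_alt (lines : List String) (startStr : String) (appendStr : String) : List String :=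
  ((formatParaPass1 startStr 0 lines).2.reverse).foldl
    (fun (acc : List String) (i : Nat) => PySem.List.insert acc ((i + 1 : Nat) : Int) appendStr)
    (formatParaPass1 startStr 0 lines).1

-- ===== PRECONDITION & SPEC =====
-- Pre_ excludes exactly the inputs on which Python A never returns: if appendStr itself starts
-- with startStr (in particular startStr = "") and some line starts with startStr, A's loop
-- re-processes each inserted appendStr forever.
def Pre_formatPara (lines : List String) (startStr : String) (appendStr : String) : Prop :=
  PySem.Str.startswith appendStr startStr = true →
    ∀ l ∈ lines, PySem.Str.startswith l startStr = false

instance (lines : List String) (startStr : String) (appendStr : String) : Decidable (Pre_formatPara lines startStr appendStr) := by unfold Pre_formatPara; infer_instance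

def pvWitness_formatPara : List String × String × String := (["## Title", "text"], "## ", "-----")

def Spec_formatPara (lines : List String) (startStr : String) (appendStr : String) (out : List String) : Prop := out = formatPara_alt lines startStr appendStr
instance (lines : List String) (startStr : String) (appendStr : String) (out : List String) : Decidable (Spec_formatPara lines startStr appendStr out) := by unfold Spec_formatPara; infer_instance

-- ===== CLAIM (what is proved, stated in full; the proofs are below) =====
def Claim_equal_formatPara : Prop := ∀ (lines : List String) (startStr : String) (appendStr : String), Dom_formatPara lines startStr appendStr → Pre_formatPara lines startStr appendStr → Spec_formatPara lines startStr appendStr (formatPara lines startStr appendStr)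

-- ===== LEMMAS AND PROOFS =====

-- the per-line segment both programs produce
def pvSeg (startStr appendStr : String) (l : String) : List String :=
  if PySem.Str.startswith l startStr then
    [PySem.Str.replace l startStr "", appendStr]
  else [l]

theorem goA_flatMap (startStr appendStr : String)
    (ha : PySem.Str.startswith appendStr startStr = false) :
    ∀ (ls : List String) (fuel : Nat), 2 * ls.length ≤ fuel →
      formatParaGoA startStr appendStr fuel ls = ls.flatMap (pvSeg startStr appendStr) := by
  intro ls
  induction ls with
  | nil => intro fuel _; cases fuel <;> simp [formatParaGoA]
  | cons l rest ih =>
    intro fuel hf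
    obtain ⟨f, rfl⟩ : ∃ f, fuel = f + 1 := ⟨fuel - 1, by simp at hf; omega⟩
    simp only [formatParaGoA, pvSeg, List.flatMap_cons]
    cases hl : PySem.Str.startswith l startStr with
    | true =>
      obtain ⟨f', rfl⟩ : ∃ f', f = f' + 1 := ⟨f - 1, by simp at hf; omega⟩
      simp only [if_true]
      rw [show formatParaGoA startStr appendStr (f' + 1) (appendStr :: rest)
            = appendStr :: formatParaGoA startStr appendStr f' rest by
            simp only [formatParaGoA, ha, Bool.false_eq_true, if_false]]
      rw [ih f' (by simp at hf ⊢; omega)]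
      simp
    | false =>
      simp only [Bool.false_eq_true, if_false]
      rw [ih f (by simp at hf ⊢; omega)]
      simp

theorem goA_id (startStr appendStr : String) :
    ∀ (ls : List String) (fuel : Nat),
      (∀ l ∈ ls, PySem.Str.startswith l startStr = false) → ls.length ≤ fuel →
      formatParaGoA startStr appendStr fuel ls = ls := by
  intro ls
  induction ls with
  | nil => intro fuel _ _; cases fuel <;> simp [formatParaGoA]
  | cons l rest ih =>
    intro fuel h hf
    obtain ⟨f, rfl⟩ : ∃ f, fuel = f + 1 := ⟨fuel - 1, by simp at hf; omega⟩
    simp only [formatParaGoA]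
    rw [h l (List.mem_cons_self ..)]
    simp only [Bool.false_eq_true, if_false]
    rw [ih f (fun x hx => h x (List.mem_cons_of_mem _ hx)) (by simp at hf ⊢; omega)]

theorem flatMap_id_of_no_match (startStr appendStr : String) (ls : List String)
    (h : ∀ l ∈ ls, PySem.Str.startswith l startStr = false) :
    ls.flatMap (pvSeg startStr appendStr) = ls := by
  induction ls with
  | nil => simp
  | cons l rest ih =>
    simp only [List.flatMap_cons, pvSeg, h l (List.mem_cons_self ..)]
    simp only [Bool.false_eq_true, if_false]
    rw [ih (fun x hx => h x (List.mem_cons_of_mem _ hx))]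
    rfl

theorem alt_general (startStr appendStr : String) :
    ∀ (ls : List String) (pre : List String),
      ((formatParaPass1 startStr pre.length ls).2).foldr
          (fun (i : Nat) acc => PySem.List.insert acc ((i + 1 : Nat) : Int) appendStr)
          (pre ++ (formatParaPass1 startStr pre.length ls).1)
        = pre ++ ls.flatMap (pvSeg startStr appendStr) := by
  intro ls
  induction ls with
  | nil => intro pre; simp [formatParaPass1]
  | cons l rest ih =>
    intro pre
    simp only [formatParaPass1, List.flatMap_cons, pvSeg]
    cases hl : PySem.Str.startswith l startStr with
    | true =>
      simp only [if_true, List.foldr_cons]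
      have hp : pre ++ PySem.Str.replace l startStr "" :: (formatParaPass1 startStr (pre.length + 1) rest).1
          = (pre ++ [PySem.Str.replace l startStr ""]) ++ (formatParaPass1 startStr (pre.length + 1) rest).1 := by
        simp
      have hlen : pre.length + 1 = (pre ++ [PySem.Str.replace l startStr ""]).length := by simp
      rw [hp, hlen, ih (pre ++ [PySem.Str.replace l startStr ""])]
      rw [PySem.List.insert_natCast _ _ _ (by simp)]
      have htk : List.take (pre.length + 1)
          (pre ++ PySem.Str.replace l startStr "" :: List.flatMap (pvSeg startStr appendStr) rest)
          = pre ++ [PySem.Str.replace l startStr ""] := by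
        rw [show pre ++ PySem.Str.replace l startStr "" :: List.flatMap (pvSeg startStr appendStr) rest
              = (pre ++ [PySem.Str.replace l startStr ""]) ++ List.flatMap (pvSeg startStr appendStr) rest by simp,
           hlen, List.take_left]
      simp [htk]
    | false =>
      simp only [Bool.false_eq_true, if_false]
      have hp : pre ++ l :: (formatParaPass1 startStr (pre.length + 1) rest).1
          = (pre ++ [l]) ++ (formatParaPass1 startStr (pre.length + 1) rest).1 := by simp
      have hlen : pre.length + 1 = (pre ++ [l]).length := by simp
      rw [hp, hlen, ih (pre ++ [l])]
      simp

theorem alt_flatMap (lines : List String) (startStr appendStr : String) :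
    formatPara_alt lines startStr appendStr = lines.flatMap (pvSeg startStr appendStr) := by
  unfold formatPara_alt
  rw [List.foldl_reverse]

  have := alt_general startStr appendStr lines []
  simpa using this

-- ===== VERDICT (by name: the statement is the Claim_ definition above) =====
theorem formatPara_spec : Claim_equal_formatPara := by
  intro lines startStr appendStr _ hpre
  unfold Spec_formatPara
  rw [alt_flatMap]
  unfold formatPara
  by_cases ha : PySem.Str.startswith appendStr startStr = true
  · have hall := hpre ha
    rw [goA_id startStr appendStr lines _ hall (by omega)]
    rw [flatMap_id_of_no_match startStr appendStr lines hall]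
  · exact goA_flatMap startStr appendStr (Bool.eq_false_iff.mpr ha) lines _ (by omega)
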